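-- pv_equiv track=rewrite | github.com/zackmeach/Down-Data | player.py | validate_seasons
-- ===== SOURCE A (Python) =====
-- from typing import Any, Dict, Iterable, List, Optional, Union
--
-- EARLIEST_SEASON_AVAILABLE = 1999
--
-- LATEST_SEASON_AVAILABLE = 2025  # Updated as new seasons become available
--
-- def validate_seasons(seasons: Optional[Iterable[int]] = None) -> tuple[List[int], List[int]]:
--     """Split requested seasons into valid and invalid collections."""
--
--     if seasons is None:
--         return ([], [])
--
--     season_list = list(seasons)
--     valid = [season for season in season_list if EARLIEST_SEASON_AVAILABLE <= season <= LATEST_SEASON_AVAILABLE]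
--     valid_set = set(valid)
--     invalid = [season for season in season_list if season not in valid_set]
--     return (valid, invalid)
-- ===== SOURCE B (Python) =====
-- from typing import Iterable, List, Optional
--
-- EARLIEST_SEASON_AVAILABLE = 1999
-- LATEST_SEASON_AVAILABLE = 2025
--
-- def validate_seasons(seasons: Optional[Iterable[int]] = None) -> tuple[List[int], List[int]]:
--     """Split requested seasons into valid and invalid collections (single pass)."""
--     if seasons is None:
--         return ([], [])
--     valid: List[int] = []
--     invalid: List[int] = []
--     for season in seasons:
--         if EARLIEST_SEASON_AVAILABLE <= season <= LATEST_SEASON_AVAILABLE: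
--             valid.append(season)
--         else:
--             invalid.append(season)
--     return (valid, invalid)
-- ===== Notes on version B (the rewrite author's own statement) =====
-- stated objective: simpler
-- what changed: Replaces the two list comprehensions plus an auxiliary membership set with one branching loop that routes each season into valid or invalid in a single pass.
import Mathlib
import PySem

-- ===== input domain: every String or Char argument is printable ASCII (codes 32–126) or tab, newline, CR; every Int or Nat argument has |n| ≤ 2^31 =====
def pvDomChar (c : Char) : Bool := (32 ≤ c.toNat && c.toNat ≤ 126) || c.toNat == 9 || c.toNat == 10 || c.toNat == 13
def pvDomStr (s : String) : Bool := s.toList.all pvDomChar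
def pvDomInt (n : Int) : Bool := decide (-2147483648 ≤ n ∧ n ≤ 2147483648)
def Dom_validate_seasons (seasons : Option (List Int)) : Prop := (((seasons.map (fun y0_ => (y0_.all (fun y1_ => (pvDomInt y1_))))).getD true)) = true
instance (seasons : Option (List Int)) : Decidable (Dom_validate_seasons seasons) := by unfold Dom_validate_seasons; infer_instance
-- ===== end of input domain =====

-- Header: B builds valid and invalid in one branching pass instead of two comprehensions plus a membership set; objective: simpler.

-- ===== PORT A =====
def validate_seasons (seasons : Option (List Int)) : List Int × List Int :=
  match seasons with
  | none => ([], [])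
  | some season_list =>
    let valid := season_list.filter (fun season => decide (1999 ≤ season ∧ season ≤ 2025))
    let valid_set := PySem.Set.ofList valid
    let invalid := season_list.filter (fun season => ¬ PySem.Set.contains valid_set season)
    (valid, invalid)

-- ===== PORT B =====
def validate_seasons_alt (seasons : Option (List Int)) : List Int × List Int :=
  match seasons with
  | none => ([], [])
  | some xs =>
    xs.foldl (fun (acc : List Int × List Int) season =>
      if 1999 ≤ season ∧ season ≤ 2025 then (acc.1 ++ [season], acc.2)
      else (acc.1, acc.2 ++ [season])) ([], [])

-- ===== PRECONDITION & SPEC =====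
def Spec_validate_seasons (seasons : Option (List Int)) (out : List Int × List Int) : Prop := out = validate_seasons_alt seasons
instance (seasons : Option (List Int)) (out : List Int × List Int) : Decidable (Spec_validate_seasons seasons out) := by unfold Spec_validate_seasons; infer_instance

-- ===== CLAIM (what is proved, stated in full; the proofs are below) =====
def Claim_equal_validate_seasons : Prop := ∀ (seasons : Option (List Int)), Dom_validate_seasons seasons → Spec_validate_seasons seasons (validate_seasons seasons)

-- ===== LEMMAS AND PROOFS =====

theorem mem_valid_iff (xs : List Int) (s : Int) (hs : s ∈ xs) :
    PySem.Set.contains (PySem.Set.ofList (xs.filter (fun season => decide (1999 ≤ season ∧ season ≤ 2025)))) s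
      = decide (1999 ≤ s ∧ s ≤ 2025) := by
  by_cases h : 1999 ≤ s ∧ s ≤ 2025 <;>
    simp [PySem.Set.contains, PySem.Set.mem_ofList, List.mem_filter, h, hs]

theorem foldl_partition (xs : List Int) (v inv : List Int) :
    xs.foldl (fun (acc : List Int × List Int) season =>
      if 1999 ≤ season ∧ season ≤ 2025 then (acc.1 ++ [season], acc.2)
      else (acc.1, acc.2 ++ [season])) (v, inv)
    = (v ++ xs.filter (fun s => decide (1999 ≤ s ∧ s ≤ 2025)),
       inv ++ xs.filter (fun s => !decide (1999 ≤ s ∧ s ≤ 2025))) := by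
  induction xs generalizing v inv with
  | nil => simp
  | cons x t ih =>
    by_cases h : 1999 ≤ x ∧ x ≤ 2025 <;>
      simp only [List.foldl_cons, List.filter_cons, h, if_pos, if_neg, decide_true, decide_false,
        Bool.not_true, Bool.not_false, ite_true, ite_false, ih, List.append_assoc,
        List.singleton_append, List.cons_append, List.nil_append, decide_eq_true_eq] <;>
      simp [h, ih]

-- ===== VERDICT (by name: the statement is the Claim_ definition above) =====
theorem validate_seasons_spec : Claim_equal_validate_seasons := by
  intro seasons _
  unfold Spec_validate_seasons validate_seasons validate_seasons_alt
  cases seasons with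
  | none => rfl
  | some xs =>
    simp only [foldl_partition, List.nil_append]
    refine Prod.ext rfl ?_
    simp only
    apply List.filter_congr
    intro s hs
    rw [mem_valid_iff xs s hs]
    by_cases h : 1999 ≤ s ∧ s ≤ 2025 <;> simp [h]
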